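-- pv_equiv track=rewrite | github.com/zeroregard/Ars-Zero | scripts/generate_structure_world.py | _pack_block_states
-- ===== SOURCE A (Python) =====
-- def _pack_block_states(indices: list, bits_per_entry: int) -> list:
--     """Pack block state indices into 64-bit longs (Minecraft 1.16+ format)."""
--     # Each long holds floor(64/bits_per_entry) values, no cross-long packing
--     values_per_long = 64 // bits_per_entry
--     longs = []
--     for i in range(0, len(indices), values_per_long):
--         chunk = indices[i:i + values_per_long]
--         val = 0
--         for j, idx in enumerate(chunk):
--             val |= (idx & ((1 << bits_per_entry) - 1)) << (j * bits_per_entry)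
--         # Convert to signed long
--         if val >= (1 << 63):
--             val -= (1 << 64)
--         longs.append(val)
--     return longs
-- ===== SOURCE B (Python) =====
-- def _pack_block_states(indices: list, bits_per_entry: int) -> list:
--     """Pack block state indices into 64-bit longs (Minecraft 1.16+ format)."""
--     values_per_long = 64 // bits_per_entry
--     mask = (1 << bits_per_entry) - 1
--     longs = []
--     val = 0
--     offset = 0
--     count = 0
--     for idx in indices:
--         val |= (idx & mask) << offset
--         offset += bits_per_entry
--         count += 1
--         if count == values_per_long:
--             longs.append(val - (1 << 64) if val >= (1 << 63) else val)
--             val = 0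
--             offset = 0
--             count = 0
--     if count > 0:
--         longs.append(val - (1 << 64) if val >= (1 << 63) else val)
--     return longs
-- ===== Notes on version B (the rewrite author's own statement) =====
-- stated objective: simpler
-- what changed: Replaces the chunked nested loop (range-stepped slicing plus an inner enumerate loop) with a single flat pass maintaining a running long, a bit offset and a count, flushing each completed long and a final partial one.
-- outside the precondition, e.g. on _pack_block_states([1], -3): A returns [], B raises ValueError
import Mathlib
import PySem

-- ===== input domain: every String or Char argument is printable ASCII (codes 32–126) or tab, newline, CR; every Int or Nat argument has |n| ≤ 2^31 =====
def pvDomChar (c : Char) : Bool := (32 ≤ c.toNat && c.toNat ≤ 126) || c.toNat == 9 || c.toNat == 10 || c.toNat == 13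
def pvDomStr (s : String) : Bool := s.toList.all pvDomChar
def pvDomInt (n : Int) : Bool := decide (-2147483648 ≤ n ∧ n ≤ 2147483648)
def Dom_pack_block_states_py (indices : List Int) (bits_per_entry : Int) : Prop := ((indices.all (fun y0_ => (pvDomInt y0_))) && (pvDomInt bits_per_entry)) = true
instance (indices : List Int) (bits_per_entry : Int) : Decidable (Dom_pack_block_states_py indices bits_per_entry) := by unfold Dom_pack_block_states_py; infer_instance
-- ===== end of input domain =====

-- B replaces A's chunked nested loop with a single flat pass keeping a running long,
-- bit offset and count, flushing each completed long and a trailing partial one (objective: simpler).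

-- ===== PORT A =====
def pack_block_states_py (indices : List Int) (bits_per_entry : Int) : List Int :=
  let values_per_long := PySem.Int.floordiv 64 bits_per_entry
  (PySem.List.pyRange 0 (indices.length : Int) values_per_long).foldl
    (fun longs i =>
      let chunk := PySem.List.slice indices (some i) (some (i + values_per_long))
      let val := (PySem.List.enumerate chunk).foldl
        (fun val ji =>
          PySem.Int.bor val
            ((PySem.Int.band ji.2 ((1 <<< bits_per_entry.toNat : Int) - 1)) <<< (ji.1 * bits_per_entry).toNat))
        0
      let val := if val ≥ (1 <<< 63 : Int) then val - (1 <<< 64 : Int) else val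
      longs ++ [val])
    []

-- ===== PORT B =====
def pack_block_states_py_alt (indices : List Int) (bits_per_entry : Int) : List Int :=
  let values_per_long := PySem.Int.floordiv 64 bits_per_entry
  let mask := (1 <<< bits_per_entry.toNat : Int) - 1
  let st := indices.foldl
    (fun (s : List Int × Int × Int × Int) idx =>
      let longs := s.1
      let val := PySem.Int.bor s.2.1 ((PySem.Int.band idx mask) <<< s.2.2.1.toNat)
      let offset := s.2.2.1 + bits_per_entry
      let count := s.2.2.2 + 1
      if count = values_per_long then
        (longs ++ [if val ≥ (1 <<< 63 : Int) then val - (1 <<< 64 : Int) else val], 0, 0, 0)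
      else
        (longs, val, offset, count))
    ([], 0, 0, 0)
  if st.2.2.2 > 0 then
    st.1 ++ [if st.2.1 ≥ (1 <<< 63 : Int) then st.2.1 - (1 <<< 64 : Int) else st.2.1]
  else
    st.1

-- ===== PRECONDITION & SPEC =====
-- Pre_ excludes bits_per_entry outside 1..64: for bits_per_entry = 0 or > 64 A raises
-- (ZeroDivisionError / ValueError: zero range step), and for bits_per_entry < 0 A's []
-- is an accident of range's negative step, where B's natural flat pass raises on the
-- negative shift (see the cite in the claim).
def Pre_pack_block_states_py (indices : List Int) (bits_per_entry : Int) : Prop :=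
  1 ≤ bits_per_entry ∧ bits_per_entry ≤ 64
instance (indices : List Int) (bits_per_entry : Int) : Decidable (Pre_pack_block_states_py indices bits_per_entry) := by unfold Pre_pack_block_states_py; infer_instance

def pvWitness_pack_block_states_py : List Int × Int := ([3, 1, 4, 1, 5], 5)

def Spec_pack_block_states_py (indices : List Int) (bits_per_entry : Int) (out : List Int) : Prop := out = pack_block_states_py_alt indices bits_per_entry
instance (indices : List Int) (bits_per_entry : Int) (out : List Int) : Decidable (Spec_pack_block_states_py indices bits_per_entry out) := by unfold Spec_pack_block_states_py; infer_instance

-- ===== CLAIM (what is proved, stated in full; the proofs are below) =====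
def Claim_equal_pack_block_states_py : Prop := ∀ (indices : List Int) (bits_per_entry : Int), Dom_pack_block_states_py indices bits_per_entry → Pre_pack_block_states_py indices bits_per_entry → Spec_pack_block_states_py indices bits_per_entry (pack_block_states_py indices bits_per_entry)

-- ===== LEMMAS AND PROOFS =====

-- Reference packer: OR the masked values into an accumulator at offsets off, off+bpe, …
def packAcc (bpe mask : Int) : List Int → Int → Int → Int
  | [], val, _ => val
  | x :: ys, val, off =>
      packAcc bpe mask ys (PySem.Int.bor val ((PySem.Int.band x mask) <<< off.toNat)) (off + bpe)

def pvSigned (val : Int) : Int := if val ≥ (1 <<< 63 : Int) then val - (1 <<< 64 : Int) else val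

-- Reference chunking with chunk size w+1.
def refChunks (bpe mask : Int) (w : Nat) : List Int → List Int
  | [] => []
  | x :: rest =>
      pvSigned (packAcc bpe mask ((x :: rest).take (w + 1)) 0 0)
        :: refChunks bpe mask w (rest.drop w)
termination_by xs => xs.length
decreasing_by simp

lemma refChunks_nil (bpe mask : Int) (w : Nat) : refChunks bpe mask w [] = [] := by
  rw [refChunks.eq_def]

lemma refChunks_cons (bpe mask : Int) (w : Nat) (x : Int) (rest : List Int) :
    refChunks bpe mask w (x :: rest)
      = pvSigned (packAcc bpe mask ((x :: rest).take (w + 1)) 0 0)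
          :: refChunks bpe mask w (rest.drop w) := by
  rw [refChunks.eq_def]

lemma pyRange_pos_cons (a b s : Int) (hs : 0 < s) (hab : a < b) :
    PySem.List.pyRange a b s = a :: PySem.List.pyRange (a + s) b s := by
  rw [PySem.List.pyRange_of_pos _ _ hs, PySem.List.pyRange_of_pos _ _ hs]
  have hstep : (b - a + s - 1) / s = (b - a - 1) / s + 1 := by
    have h : b - a + s - 1 = (b - a - 1) + 1 * s := by ring
    rw [h, Int.add_mul_ediv_right _ _ (by omega : s ≠ 0)]
  have hq0 : 0 ≤ (b - a - 1) / s := Int.ediv_nonneg (by omega) (by omega)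
  by_cases h2 : a + s < b
  · have hstep2 : (b - (a + s) + s - 1) / s = (b - a - 1) / s := by ring_nf
    simp only [if_pos hab, if_pos h2, hstep, hstep2]
    have htn : ((b - a - 1) / s + 1).toNat = ((b - a - 1) / s).toNat + 1 := by omega
    rw [htn, List.range_succ_eq_map, List.map_cons, List.map_map]
    congr 1
    · simp
    · apply List.map_congr_left
      intro k _
      simp only [Function.comp_apply]
      push_cast
      ring
  · have hz : (b - a - 1) / s = 0 := Int.ediv_eq_zero_of_lt (by omega) (by omega)
    simp only [if_pos hab, if_neg h2, hstep, hz]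
    norm_num

lemma pyRange_pos_nil (a b s : Int) (hs : 0 < s) (hab : b ≤ a) :
    PySem.List.pyRange a b s = [] := by
  rw [PySem.List.pyRange_of_pos _ _ hs, if_neg (by omega)]
  simp

-- A's inner enumerate fold is packAcc (the offsets j*bpe advance by bpe each step).
lemma foldA_packAcc (bpe mask : Int) (chunk : List Int) :
    ∀ (j0 val : Int),
      (PySem.List.enumerate chunk j0).foldl
        (fun val ji => PySem.Int.bor val ((PySem.Int.band ji.2 mask) <<< (ji.1 * bpe).toNat)) val
      = packAcc bpe mask chunk val (j0 * bpe) := by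
  induction chunk with
  | nil => intro j0 val; simp [PySem.List.enumerate_nil, packAcc]
  | cons x ys ih =>
      intro j0 val
      rw [PySem.List.enumerate_cons]
      simp only [List.foldl_cons, packAcc]
      rw [ih (j0 + 1)]
      congr 1
      ring

-- One step of B's fold.
def stepB (bpe mask vpl : Int) (s : List Int × Int × Int × Int) (idx : Int) :
    List Int × Int × Int × Int :=
  let longs := s.1
  let val := PySem.Int.bor s.2.1 ((PySem.Int.band idx mask) <<< s.2.2.1.toNat)
  let offset := s.2.2.1 + bpe
  let count := s.2.2.2 + 1
  if count = vpl then (longs ++ [pvSigned val], 0, 0, 0)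
  else (longs, val, offset, count)

-- B's fold within an unfinished chunk accumulates packAcc.
lemma foldB_partial (bpe mask vpl : Int) (ys : List Int) :
    ∀ (longs : List Int) (val off count : Int),
      count + ys.length < vpl →
      ys.foldl (stepB bpe mask vpl) (longs, val, off, count)
        = (longs, packAcc bpe mask ys val off, off + ys.length * bpe, count + ys.length) := by
  induction ys with
  | nil => intro longs val off count _; simp [packAcc]
  | cons x ys ih =>
      intro longs val off count h
      simp only [List.foldl_cons, stepB]
      rw [if_neg (by simp at h ⊢; omega)]
      rw [ih _ _ _ _ (by simp at h ⊢; omega)]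
      simp only [packAcc, List.length_cons]
      refine congrArg₂ Prod.mk rfl (congrArg₂ Prod.mk rfl (congrArg₂ Prod.mk ?_ ?_))
      · push_cast; ring
      · push_cast; ring

-- B's fold over a chunk that exactly completes a long flushes it and resets.
lemma foldB_complete (bpe mask vpl : Int) (ys : List Int) :
    ∀ (longs : List Int) (val off count : Int),
      0 < ys.length → count + ys.length = vpl →
      ys.foldl (stepB bpe mask vpl) (longs, val, off, count)
        = (longs ++ [pvSigned (packAcc bpe mask ys val off)], 0, 0, 0) := by
  induction ys with
  | nil => intro longs val off count h _; simp at h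
  | cons x ys ih =>
      intro longs val off count _ h
      simp only [List.foldl_cons, stepB]
      cases ys with
      | nil =>
          simp only [List.length_cons, List.length_nil] at h
          rw [if_pos (by omega)]
          simp [packAcc]
      | cons y t =>
          rw [if_neg (by simp at h ⊢; omega)]
          rw [ih _ _ _ _ (by simp) (by simp at h ⊢; omega)]
          simp [packAcc]

-- B's whole computation produces refChunks.
lemma foldB_refChunks (bpe mask : Int) (w : Nat)
    (hvpl : (w : Int) + 1 = PySem.Int.floordiv 64 bpe) :
    ∀ (xs longs : List Int),
      (let st := xs.foldl (stepB bpe mask (PySem.Int.floordiv 64 bpe)) (longs, 0, 0, 0)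
       if st.2.2.2 > 0 then st.1 ++ [pvSigned st.2.1] else st.1)
        = longs ++ refChunks bpe mask w xs := by
  intro xs
  induction hn : xs.length using Nat.strong_induction_on generalizing xs with
  | _ n ih =>
    cases xs with
    | nil => intro longs; simp [refChunks_nil]
    | cons x rest =>
      intro longs
      subst hn
      by_cases hbig : w + 1 ≤ (x :: rest).length
      · have hsplit : x :: rest = (x :: rest).take (w + 1) ++ (x :: rest).drop (w + 1) := by
          simp
        have hlen : ((x :: rest).take (w + 1)).length = w + 1 := by
          simp at hbig ⊢
          omega
        conv_lhs => rw [hsplit]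
        rw [List.foldl_append]
        rw [foldB_complete bpe mask _ _ longs 0 0 0 (by rw [hlen]; omega)
              (by rw [hlen, ← hvpl]; push_cast; ring)]
        rw [ih ((x :: rest).drop (w + 1)).length
              (by simp only [List.length_drop, List.length_cons]; omega)
              ((x :: rest).drop (w + 1)) rfl]
        rw [refChunks_cons]
        simp
      · push_neg at hbig
        rw [foldB_partial bpe mask _ _ longs 0 0 0
              (by rw [← hvpl]; simp at hbig ⊢; omega)]
        simp only []
        rw [if_pos (by simp only [List.length_cons]; push_cast; omega)]
        have htake : (x :: rest).take (w + 1) = x :: rest :=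
          List.take_of_length_le (by omega)
        have hdrop : rest.drop w = [] := List.drop_eq_nil_of_le (by simp at hbig ⊢; omega)
        rw [refChunks_cons]
        simp [htake, hdrop, refChunks_nil]

-- A's range-and-slice loop also produces refChunks.
lemma foldA_refChunks (indices : List Int) (bpe mask : Int) (w : Nat)
    (hvpl : (w : Int) + 1 = PySem.Int.floordiv 64 bpe) :
    ∀ (k : Nat) (acc : List Int),
      (PySem.List.pyRange (k : Int) (indices.length : Int) (PySem.Int.floordiv 64 bpe)).foldl
        (fun longs i =>
          longs ++ [pvSigned
            ((PySem.List.enumerate (PySem.List.slice indices (some i) (some (i + PySem.Int.floordiv 64 bpe)))).foldl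
              (fun val ji => PySem.Int.bor val ((PySem.Int.band ji.2 mask) <<< (ji.1 * bpe).toNat)) 0)]) acc
      = acc ++ refChunks bpe mask w (indices.drop k) := by
  intro k
  induction hk : indices.length - k using Nat.strong_induction_on generalizing k with
  | _ m ih =>
    intro acc
    by_cases hlt : k < indices.length
    · rw [pyRange_pos_cons _ _ _ (by omega) (by exact_mod_cast hlt)]
      rw [List.foldl_cons]
      have hslice : PySem.List.slice indices (some (k : Int)) (some ((k : Int) + PySem.Int.floordiv 64 bpe))
          = (indices.drop k).take (w + 1) := by
        rw [← hvpl]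
        have hcast : (k : Int) + ((w : Int) + 1) = ((k + (w + 1) : Nat) : Int) := by push_cast; ring
        rw [hcast, PySem.List.slice_natCast]
        congr 1
        omega
      have hnext : (k : Int) + PySem.Int.floordiv 64 bpe = ((k + (w + 1) : Nat) : Int) := by
        rw [← hvpl]; push_cast; ring
      rw [hslice, foldA_packAcc bpe mask _ 0 0, zero_mul, hnext]
      subst hk
      rw [ih (indices.length - (k + (w + 1))) (by omega) (k + (w + 1)) rfl]
      have hd : indices.drop k ≠ [] := by
        intro hcon
        have := List.drop_eq_nil_iff.mp hcon
        omega
      match hd2 : indices.drop k with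
      | [] => exact absurd hd2 hd
      | y :: t =>
        rw [refChunks_cons]
        have hdd : indices.drop (k + (w + 1)) = t.drop w := by
          rw [← List.drop_drop]
          rw [show k + (w + 1) = (w + 1) + k by omega] at *
          rw [← List.drop_drop, hd2]
          simp
        rw [hdd]
        simp
    · rw [pyRange_pos_nil _ _ _ (by omega) (by exact_mod_cast (by omega : indices.length ≤ k))]
      rw [List.drop_eq_nil_of_le (by omega)]
      simp [refChunks_nil]

-- ===== VERDICT (by name: the statement is the Claim_ definition above) =====
theorem pack_block_states_py_spec : Claim_equal_pack_block_states_py := by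
  intro indices bpe _ hpre
  obtain ⟨h1, h64⟩ := hpre
  have hpos : 0 < PySem.Int.floordiv 64 bpe := by
    rw [PySem.Int.floordiv_eq_ediv_of_pos (by omega)]
    have h := (Int.le_ediv_iff_mul_le (by omega : 0 < bpe)).mpr (by omega : 1 * bpe ≤ 64)
    omega
  obtain ⟨w, hw⟩ : ∃ w : Nat, (w : Int) + 1 = PySem.Int.floordiv 64 bpe :=
    ⟨(PySem.Int.floordiv 64 bpe - 1).toNat, by omega⟩
  have hA : pack_block_states_py indices bpe
      = [] ++ refChunks bpe ((1 <<< bpe.toNat : Int) - 1) w (indices.drop 0) :=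
    foldA_refChunks indices bpe ((1 <<< bpe.toNat : Int) - 1) w hw 0 []
  have hB : pack_block_states_py_alt indices bpe
      = [] ++ refChunks bpe ((1 <<< bpe.toNat : Int) - 1) w indices :=
    foldB_refChunks bpe ((1 <<< bpe.toNat : Int) - 1) w hw indices []
  simp only [List.drop_zero, List.nil_append] at hA hB
  exact hA.trans hB.symm
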